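-- pv_equiv track=rewrite | github.com/successar/SMT | smt/phrasetable_gen/phrase_extract.py | available_phrases
-- ===== SOURCE A (Python) =====
-- def available_phrases(fs, phrases):
--     """ return : set of phrase indexed tuple like """
--     available = set()
--     for i, f in enumerate(fs):
--         f_rest = ()
--         for fr in fs[i:]:
--             f_rest += (fr,)
--             if f_rest in phrases:
--                 available.add(tuple(enumerate(f_rest, i+1)))
--     return available
-- ===== SOURCE B (Python) =====
-- def available_phrases(fs, phrases):
--     """Search fs only at the distinct lengths of known phrases, instead of
--     generating every substring of fs and testing membership."""
--     phrase_set = {p for p in phrases if p}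
--     n = len(fs)
--     lengths = sorted({len(p) for p in phrase_set})
--     available = set()
--     for i in range(n):
--         for L in lengths:
--             if i + L > n:
--                 break
--             piece = tuple(fs[i:i + L])
--             if piece in phrase_set:
--                 available.add(tuple(enumerate(piece, i + 1)))
--     return available
-- ===== Notes on version B (the rewrite author's own statement) =====
-- stated objective: faster
-- what changed: Instead of enumerating every prefix of every suffix of fs and testing it for membership, B precomputes the sorted distinct lengths of the nonempty phrases and, at each start position, probes only the slices of those few lengths against a set of the phrases.
import Mathlib
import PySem

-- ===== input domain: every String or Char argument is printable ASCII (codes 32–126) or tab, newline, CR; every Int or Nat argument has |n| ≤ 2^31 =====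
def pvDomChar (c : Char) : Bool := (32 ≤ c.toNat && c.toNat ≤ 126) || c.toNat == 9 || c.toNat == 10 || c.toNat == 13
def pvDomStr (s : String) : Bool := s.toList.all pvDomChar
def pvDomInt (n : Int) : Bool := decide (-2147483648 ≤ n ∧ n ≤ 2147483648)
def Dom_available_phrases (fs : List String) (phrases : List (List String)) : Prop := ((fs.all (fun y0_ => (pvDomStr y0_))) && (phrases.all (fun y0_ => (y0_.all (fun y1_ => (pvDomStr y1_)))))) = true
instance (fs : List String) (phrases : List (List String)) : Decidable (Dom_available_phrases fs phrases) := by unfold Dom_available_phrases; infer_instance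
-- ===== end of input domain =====

-- B probes fs only at the distinct lengths of the known phrases instead of testing every substring; objective: faster.


-- ===== PORT A =====
def available_phrases (fs : List String) (phrases : List (List String)) : List (List (Int × String)) :=
  let available : PySem.Set (List (Int × String)) := PySem.Set.empty
  (PySem.List.enumerate fs).foldl
    (fun (available : PySem.Set (List (Int × String))) (p : Int × String) =>
      ((PySem.List.slice fs (some p.1) none).foldl
          (fun (st : PySem.Set (List (Int × String)) × List String) (fr : String) =>
            let f_rest := st.2 ++ [fr]
            if f_rest ∈ phrases then
              (PySem.Set.add st.1 (PySem.List.enumerate f_rest (p.1 + 1)), f_rest)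
            else
              (st.1, f_rest))
          (available, ([] : List String))).1)
    available

-- ===== PORT B =====
-- inner loop of B: try each candidate length in order, 'break' once i + L exceeds n
def altSearch (fs : List String) (phraseSet : List (List String)) (n i : Int)
    (lengths : List Int) (available : PySem.Set (List (Int × String))) :
    PySem.Set (List (Int × String)) :=
  match lengths with
  | [] => available
  | L :: Ls =>
    if i + L > n then available
    else
      let piece := PySem.List.slice fs (some i) (some (i + L))
      let available :=
        if piece ∈ phraseSet then
          PySem.Set.add available (PySem.List.enumerate piece (i + 1))
        else available
      altSearch fs phraseSet n i Ls available

def available_phrases_alt (fs : List String) (phrases : List (List String)) : List (List (Int × String)) :=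
  let phraseSet : PySem.Set (List String) := PySem.Set.ofList (phrases.filter (fun p => !p.isEmpty))
  let n : Int := PySem.List.len fs
  let lengths : List Int :=
    PySem.List.sorted (PySem.Set.ofList (phraseSet.map (fun p => PySem.List.len p))) (fun x => x) false
  (PySem.List.pyRange 0 n 1).foldl
    (fun available i => altSearch fs phraseSet n i lengths available)
    PySem.Set.empty

-- ===== PRECONDITION & SPEC =====
def Spec_available_phrases (fs : List String) (phrases : List (List String)) (out : List (List (Int × String))) : Prop := out = available_phrases_alt fs phrases
instance (fs : List String) (phrases : List (List String)) (out : List (List (Int × String))) : Decidable (Spec_available_phrases fs phrases out) := by unfold Spec_available_phrases; infer_instance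

-- ===== CLAIM (what is proved, stated in full; the proofs are below) =====
def Claim_equal_available_phrases : Prop := ∀ (fs : List String) (phrases : List (List String)), Dom_available_phrases fs phrases → Spec_available_phrases fs phrases (available_phrases fs phrases)

-- ===== LEMMAS AND PROOFS =====

-- the list of elements A's inner loop adds at start position i: matching prefixes of ys extending pre
def apMatches (phrases : List (List String)) (i : Int) (pre : List String) :
    List String → List (List (Int × String))
  | [] => []
  | fr :: ys =>
      (if pre ++ [fr] ∈ phrases then [PySem.List.enumerate (pre ++ [fr]) (i + 1)] else [])
        ++ apMatches phrases i (pre ++ [fr]) ys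

theorem apInner_eq (phrases : List (List String)) (i : Int) :
    ∀ (ys : List String) (pre : List String) (s : PySem.Set (List (Int × String))),
    (ys.foldl
        (fun (st : PySem.Set (List (Int × String)) × List String) (fr : String) =>
          let f_rest := st.2 ++ [fr]
          if f_rest ∈ phrases then
            (PySem.Set.add st.1 (PySem.List.enumerate f_rest (i + 1)), f_rest)
          else
            (st.1, f_rest))
        (s, pre)).1
      = (apMatches phrases i pre ys).foldl PySem.Set.add s := by
  intro ys
  induction ys with
  | nil => intro pre s; simp [apMatches]
  | cons fr ys ih =>
      intro pre s
      simp only [List.foldl_cons, apMatches]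
      by_cases h : pre ++ [fr] ∈ phrases
      · simp [h, ih]
      · simp [h, ih]

theorem apMatches_eq (phrases : List (List String)) (i : Int) :
    ∀ (ys pre : List String),
    apMatches phrases i pre ys
      = ((List.range' 1 ys.length).filter (fun k => decide (pre ++ ys.take k ∈ phrases))).map
          (fun k => PySem.List.enumerate (pre ++ ys.take k) (i + 1)) := by
  intro ys
  induction ys with
  | nil => intro pre; simp [apMatches]
  | cons fr ys ih =>
      intro pre
      have hmap : List.range' (1+1) ys.length = (List.range' 1 ys.length).map (1+·) :=
        (List.map_add_range' (a := 1) (s := 1) (n := ys.length) (step := 1)).symm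
      simp only [apMatches, ih (pre ++ [fr]), List.length_cons, List.range'_succ, hmap,
        List.filter_cons, List.filter_map]
      have hco1 : ∀ k:ℕ, pre ++ List.take (1+k) (fr::ys) = (pre ++ [fr]) ++ List.take k ys := by
        intro k; rw [Nat.add_comm]; simp
      by_cases h : pre ++ [fr] ∈ phrases <;>
        simp [h, List.map_map, Function.comp_def, hco1]


theorem altSearch_eq (fs : List String) (phraseSet : List (List String)) (n i : Int) :
    ∀ (Ls : List Int) (s : PySem.Set (List (Int × String))), Ls.Pairwise (· < ·) →
    altSearch fs phraseSet n i Ls s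
      = ((Ls.filter (fun L =>
            decide (i + L ≤ n) && decide (PySem.List.slice fs (some i) (some (i + L)) ∈ phraseSet))).map
          (fun L => PySem.List.enumerate (PySem.List.slice fs (some i) (some (i + L))) (i + 1))).foldl
          PySem.Set.add s := by
  intro Ls
  induction Ls with
  | nil => intro s _; simp [altSearch]
  | cons L Ls ih =>
      intro s hp
      rw [List.pairwise_cons] at hp
      by_cases hbig : i + L > n
      · have hnil : (Ls.filter (fun L =>
            decide (i + L ≤ n) && decide (PySem.List.slice fs (some i) (some (i + L)) ∈ phraseSet))) = [] := by
          apply List.filter_eq_nil_iff.mpr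
          intro L' hL'
          have := hp.1 L' hL'
          simp only [Bool.and_eq_true, decide_eq_true_eq]
          omega
        simp [altSearch, hbig, hnil]
      · by_cases hmem : PySem.List.slice fs (some i) (some (i + L)) ∈ phraseSet
        · simp [altSearch, hbig, hmem, ih _ hp.2, not_lt.mp hbig]
        · simp [altSearch, hbig, hmem, ih _ hp.2, not_lt.mp hbig]


theorem eq_of_perm_lt (l1 l2 : List Int) (hp : l1.Perm l2) (s1 : l1.Pairwise (·<·)) (s2 : l2.Pairwise (·<·)) : l1 = l2 :=
  List.Perm.eq_of_pairwise (le := (· ≤ ·)) (fun _ _ _ _ h1 h2 => le_antisymm h1 h2) (s1.imp le_of_lt) (s2.imp le_of_lt) hp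


theorem lengths_filter_eq (fs : List String) (phrases : List (List String)) (j : Nat) (hj : j < fs.length) :
    ((PySem.List.sorted
        (PySem.Set.ofList ((PySem.Set.ofList (phrases.filter (fun p => !p.isEmpty))).map
          (fun p => PySem.List.len p))) (fun x => x) false).filter
      (fun L => decide ((j : Int) + L ≤ (fs.length : Int)) &&
        decide (PySem.List.slice fs (some (j : Int)) (some ((j : Int) + L)) ∈
          PySem.Set.ofList (phrases.filter (fun p => !p.isEmpty)))))
    = ((List.range' 1 (fs.length - j)).filter
        (fun k => decide ((fs.drop j).take k ∈ phrases))).map (fun k : Nat => (k : Int)) := by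
  apply eq_of_perm_lt
  · apply (List.perm_ext_iff_of_nodup ?_ ?_).2
    · intro x
      constructor
      · intro hx
        rw [List.mem_filter] at hx
        obtain ⟨hxl, hP⟩ := hx
        simp only [Bool.and_eq_true, decide_eq_true_eq] at hP
        have hx2 : x ∈ (PySem.Set.ofList (phrases.filter (fun p => !p.isEmpty))).map
            (fun p => PySem.List.len p) := by
          have h1 := (PySem.List.mem_sorted _ _ _ _).1 hxl
          exact (PySem.Set.mem_ofList _ _).1 h1
        obtain ⟨p, hpmem, hlen⟩ := List.mem_map.1 hx2
        have hp' : p ∈ phrases.filter (fun p => !p.isEmpty) := (PySem.Set.mem_ofList _ _).1 hpmem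
        rw [List.mem_filter] at hp'
        have hlen' : x = (p.length : Int) := by simpa using hlen.symm
        have hpos : 0 < p.length := by
          rcases p with _ | _
          · simp at hp'
          · simp
        have hle : (j:Int) + (p.length : Int) ≤ (fs.length : Int) := by rw [← hlen']; exact hP.1
        have hkle : j + p.length ≤ fs.length := by exact_mod_cast hle
        have hslice : PySem.List.slice fs (some (j : Int)) (some ((j : Int) + x))
            = (fs.drop j).take p.length := by
          rw [hlen']; exact PySem.List.slice_natCast_add fs j p.length
        have hsub : (fs.drop j).take p.length ∈ phrases := by
          have := hP.2
          rw [hslice] at this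
          have h3 := (PySem.Set.mem_ofList _ _).1 this
          exact (List.mem_filter.1 h3).1
        rw [List.mem_map]
        refine ⟨p.length, ?_, hlen'.symm⟩
        rw [List.mem_filter]
        refine ⟨List.mem_range'_1.2 ⟨hpos, by omega⟩, by simpa using hsub⟩
      · intro hx
        obtain ⟨k, hk, hcast⟩ := List.mem_map.1 hx
        rw [List.mem_filter] at hk
        obtain ⟨hkr, hkp⟩ := hk
        have hkr' := List.mem_range'_1.1 hkr
        have hk1 : 1 ≤ k := hkr'.1
        have hk2 : k ≤ fs.length - j := by omega
        have hsubmem : (fs.drop j).take k ∈ phrases := by simpa using hkp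
        have hlensub : ((fs.drop j).take k).length = k := by
          simp [List.length_take, List.length_drop]; omega
        have hne : ¬ ((fs.drop j).take k).isEmpty := by
          rw [List.isEmpty_iff]; intro h
          rw [h] at hlensub; simp at hlensub; omega
        have hmemPS : (fs.drop j).take k ∈ PySem.Set.ofList (phrases.filter (fun p => !p.isEmpty)) := by
          apply (PySem.Set.mem_ofList _ _).2
          rw [List.mem_filter]
          exact ⟨hsubmem, by simpa using hne⟩
        rw [List.mem_filter]
        constructor
        · apply (PySem.List.mem_sorted _ _ _ _).2
          apply (PySem.Set.mem_ofList _ _).2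
          rw [List.mem_map]
          exact ⟨(fs.drop j).take k, hmemPS, by simp [hlensub, hcast]⟩
        · simp only [Bool.and_eq_true, decide_eq_true_eq]
          constructor
          · rw [← hcast]; omega
          · rw [← hcast, PySem.List.slice_natCast_add fs j k]; exact hmemPS
    · exact ((PySem.List.sorted_ofList_pairwise_lt _).filter _).imp ne_of_lt
    · apply List.Pairwise.imp ne_of_lt
      have hbase : ((List.range' 1 (fs.length - j)).filter
          (fun k => decide ((fs.drop j).take k ∈ phrases))).Pairwise (·<·) :=
        (List.pairwise_lt_range' 1).filter _
      exact List.Pairwise.map (S := fun (a b : Int) => a < b) (fun k : Nat => (k:Int))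
        (fun a b hab => by show (a:Int) < (b:Int); exact_mod_cast hab) hbase
  · exact (PySem.List.sorted_ofList_pairwise_lt _).filter _
  · exact List.Pairwise.map (S := fun (a b : Int) => a < b) (fun k : Nat => (k:Int))
      (fun a b hab => by show (a:Int) < (b:Int); exact_mod_cast hab) ((List.pairwise_lt_range' 1).filter _)

-- the per-position add-lists of A and B coincide
theorem adds_eq (fs : List String) (phrases : List (List String)) (j : Nat) (hj : j < fs.length) :
    apMatches phrases (j : Int) [] (fs.drop j)
      = (((PySem.List.sorted
              (PySem.Set.ofList ((PySem.Set.ofList (phrases.filter (fun p => !p.isEmpty))).map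
                (fun p => PySem.List.len p))) (fun x => x) false).filter
            (fun L => decide ((j : Int) + L ≤ (fs.length : Int)) &&
              decide (PySem.List.slice fs (some (j : Int)) (some ((j : Int) + L)) ∈
                PySem.Set.ofList (phrases.filter (fun p => !p.isEmpty))))).map
          (fun L => PySem.List.enumerate (PySem.List.slice fs (some (j : Int)) (some ((j : Int) + L)))
            ((j : Int) + 1))) := by
  rw [apMatches_eq, lengths_filter_eq fs phrases j hj, List.map_map]
  simp [Function.comp_def, PySem.List.slice_natCast_add]
  rfl

-- ===== VERDICT (by name: the statement is the Claim_ definition above) =====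
theorem available_phrases_spec : Claim_equal_available_phrases := by
  intro fs phrases _
  unfold Spec_available_phrases available_phrases available_phrases_alt
  simp only [PySem.List.len_eq]
  have hrange : PySem.List.pyRange 0 (fs.length : Int) 1 = (PySem.List.enumerate fs 0).map (·.1) := by
    rw [PySem.List.map_fst_enumerate]; norm_num
  rw [hrange, List.foldl_map]
  apply PySem.List.foldl_congr_mem
  intro acc p hp
  rw [PySem.List.mem_enumerate_iff] at hp
  obtain ⟨k, hk, rfl⟩ := hp
  simp only [zero_add]
  rw [PySem.List.slice_from_natCast]
  rw [apInner_eq phrases (k : Int) (fs.drop k) [] acc]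
  rw [adds_eq fs phrases k hk]
  rw [altSearch_eq fs (PySem.Set.ofList (phrases.filter (fun p => !p.isEmpty))) (fs.length : Int) (k : Int)
      _ acc (PySem.List.sorted_ofList_pairwise_lt _)]
  simp only [PySem.List.len_eq]
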